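-- pv_equiv track=rewrite | github.com/AdityaPagare619/ai-engine-adv | ai_engine/src/bkt_engine/advanced_models.py | _longest_incorrect_streak
-- ===== SOURCE A (Python) =====
-- from typing import Dict, List, Optional, Tuple, Any
--
-- def _longest_incorrect_streak(sequence: List[Dict]) -> int:
--     """Find longest consecutive incorrect answers"""
--     max_streak = current_streak = 0
--     for interaction in sequence:
--         if not interaction.get('is_correct', False):
--             current_streak += 1
--             max_streak = max(max_streak, current_streak)
--         else:
--             current_streak = 0
--     return max_streak
-- ===== SOURCE B (Python) =====
-- def _longest_incorrect_streak(sequence):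
--     """Find longest consecutive incorrect answers: run-length encode the
--     correctness keys first, then reduce over the incorrect runs."""
--     keys = [not interaction.get('is_correct', False) for interaction in sequence]
--     runs = []  # run-length encoding of keys: [key, count] pairs
--     for k in keys:
--         if runs and runs[-1][0] == k:
--             runs[-1][1] += 1
--         else:
--             runs.append([k, 1])
--     return max((n for k, n in runs if k), default=0)
-- ===== Notes on version B (the rewrite author's own statement) =====
-- stated objective: alternative
-- what changed: B builds a run-length encoding of the correctness keys in one pass and then reduces over the incorrect runs with max(..., default=0), instead of A's running current/max streak counters.
import Mathlib
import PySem

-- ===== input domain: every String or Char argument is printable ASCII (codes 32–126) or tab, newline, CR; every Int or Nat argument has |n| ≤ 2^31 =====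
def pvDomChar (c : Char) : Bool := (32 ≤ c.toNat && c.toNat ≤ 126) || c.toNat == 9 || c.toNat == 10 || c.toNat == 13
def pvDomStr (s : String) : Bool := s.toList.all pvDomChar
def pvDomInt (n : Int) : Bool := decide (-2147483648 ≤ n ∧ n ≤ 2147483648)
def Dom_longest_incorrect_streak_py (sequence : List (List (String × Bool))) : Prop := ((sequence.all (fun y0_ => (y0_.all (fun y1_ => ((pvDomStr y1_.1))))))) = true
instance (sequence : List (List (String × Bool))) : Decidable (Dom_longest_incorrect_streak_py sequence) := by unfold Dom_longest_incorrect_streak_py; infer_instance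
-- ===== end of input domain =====

-- B replaces A's running current/max streak counters by a run-length encoding of the
-- correctness keys followed by a max over the incorrect runs (alternative decomposition, same cost).


-- ===== PORT A =====
def longest_incorrect_streak_py (sequence : List (List (String × Bool))) : Int :=
  (sequence.foldl
    (fun (st : Int × Int) interaction =>
      if !((List.lookup "is_correct" interaction).getD false) then
        (max st.1 (st.2 + 1), st.2 + 1)
      else
        (st.1, 0))
    (0, 0)).1

-- ===== PORT B =====
-- key of one interaction: `not interaction.get('is_correct', False)`
def pvKey (interaction : List (String × Bool)) : Bool :=
  !((List.lookup "is_correct" interaction).getD false)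

-- one step of Source B's run-length-encoding loop (append to the last run or open a new one)
def pvStepRuns (runs : List (Bool × Int)) (k : Bool) : List (Bool × Int) :=
  match runs.getLast? with
  | some (k', n) => if k' == k then runs.dropLast ++ [(k', n + 1)] else runs ++ [(k, 1)]
  | none => runs ++ [(k, 1)]

def longest_incorrect_streak_py_alt (sequence : List (List (String × Bool))) : Int :=
  let keys := sequence.map pvKey
  let runs := keys.foldl pvStepRuns []
  PySem.List.maxD ((runs.filter (fun p => p.1)).map (fun p => p.2)) (fun x => x) 0

-- ===== PRECONDITION & SPEC =====
def Spec_longest_incorrect_streak_py (sequence : List (List (String × Bool))) (out : Int) : Prop := out = longest_incorrect_streak_py_alt sequence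
instance (sequence : List (List (String × Bool))) (out : Int) : Decidable (Spec_longest_incorrect_streak_py sequence out) := by unfold Spec_longest_incorrect_streak_py; infer_instance

-- ===== CLAIM (what is proved, stated in full; the proofs are below) =====
def Claim_equal_longest_incorrect_streak_py : Prop := ∀ (sequence : List (List (String × Bool))), Dom_longest_incorrect_streak_py sequence → Spec_longest_incorrect_streak_py sequence (longest_incorrect_streak_py sequence)

-- ===== LEMMAS AND PROOFS =====

-- the maximum length of an incorrect run recorded in a run list
def pvM (runs : List (Bool × Int)) : Int :=
  ((runs.filter (fun p => p.1)).map (fun p => p.2)).foldl max 0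

-- the length of the trailing incorrect run (0 if the last run is correct or there is none)
def pvLast (runs : List (Bool × Int)) : Int :=
  match runs.getLast? with
  | some (true, n) => n
  | _ => 0

lemma pvM_append (l : List (Bool × Int)) (p : Bool × Int) :
    pvM (l ++ [p]) = if p.1 then max (pvM l) p.2 else pvM l := by
  by_cases hp : p.1 <;>
    simp [pvM, List.filter_append, List.map_append, List.foldl_append, hp]

lemma pv_runs_nonneg : ∀ (keys : List Bool) (runs : List (Bool × Int)),
    (∀ p ∈ runs, 0 ≤ p.2) → ∀ p ∈ keys.foldl pvStepRuns runs, 0 ≤ p.2 := by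
  intro keys
  induction keys with
  | nil => intro runs h; simpa using h
  | cons k keys ih =>
    intro runs h
    simp only [List.foldl_cons]
    apply ih
    rcases runs.eq_nil_or_concat with rfl | ⟨l, ⟨k', n⟩, rfl⟩
    · simp [pvStepRuns]
    · rw [List.concat_eq_append] at *
      have hn : (0:Int) ≤ n := h (k', n) (by simp)
      have hl : ∀ p ∈ l, (0:Int) ≤ p.2 := fun p hp => h p (by simp [hp])
      simp only [pvStepRuns, List.getLast?_concat, List.dropLast_concat]
      split_ifs
      · intro p hp
        rcases List.mem_append.mp hp with hp | hp
        · exact hl p hp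
        · simp at hp; subst hp; simpa using by omega
      · intro p hp
        rcases List.mem_append.mp hp with hp | hp
        · exact h p hp
        · simp at hp; subst hp; simp

lemma pv_main : ∀ (keys : List Bool) (runs : List (Bool × Int)) (m c : Int),
    c = pvLast runs → m = pvM runs → (∀ p ∈ runs, 0 ≤ p.2) →
    (keys.foldl (fun (st : Int × Int) k =>
        if k then (max st.1 (st.2 + 1), st.2 + 1) else (st.1, 0)) (m, c)).1
      = pvM (keys.foldl pvStepRuns runs) := by
  intro keys
  induction keys with
  | nil => intro runs m c _ hm _; simpa using hm
  | cons k keys ih =>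
    intro runs m c hc hm hpos
    simp only [List.foldl_cons]
    rcases runs.eq_nil_or_concat with rfl | ⟨l, ⟨k', n⟩, rfl⟩
    · have hc0 : c = 0 := by simpa [pvLast] using hc
      have hm0 : m = 0 := by simpa [pvM] using hm
      subst hc0; subst hm0
      cases k
      · simp only [pvStepRuns, List.getLast?_nil, List.nil_append, Bool.false_eq_true,
          if_false]
        exact ih [(false, 1)] 0 0 (by simp [pvLast]) (by simp [pvM]) (by simp)
      · simp only [pvStepRuns, List.getLast?_nil, List.nil_append, if_true]
        have := ih [(true, 1)] (max 0 (0 + 1)) (0 + 1)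
          (by simp [pvLast]) (by simp [pvM, List.foldl]) (by simp)
        simpa using this
    · rw [List.concat_eq_append] at *
      have hn : (0:Int) ≤ n := hpos (k', n) (by simp)
      have hl : ∀ p ∈ l, (0:Int) ≤ p.2 := fun p hp => hpos p (by simp [hp])
      rw [pvM_append] at hm
      have hC : c = if k' then n else 0 := by
        cases k' <;> simpa [pvLast, List.getLast?_concat] using hc
      simp only [pvStepRuns, List.getLast?_concat, List.dropLast_concat]
      cases k' <;> cases k <;>
        simp only [Bool.false_eq_true, if_false, if_true] at hm hC <;>
        subst hm <;> subst hC
      -- k' = false, k = false : extend the correct run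
      · have := ih (l ++ [(false, n + 1)]) (pvM l) 0
          (by simp [pvLast]) (by rw [pvM_append]; simp)
          (by intro p hp
              rcases List.mem_append.mp hp with hp | hp
              · exact hl p hp
              · simp at hp; subst hp; simpa using by omega)
        simpa using this
      -- k' = false, k = true : open a new incorrect run
      · have := ih ((l ++ [(false, n)]) ++ [(true, 1)]) (max (pvM l) (0 + 1)) (0 + 1)
          (by simp [pvLast])
          (by rw [pvM_append, pvM_append]; simp)
          (by intro p hp
              rcases List.mem_append.mp hp with hp | hp
              · exact hpos p hp
              · simp at hp; subst hp; simp)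
        simpa using this
      -- k' = true, k = false : open a new correct run
      · have := ih ((l ++ [(true, c)]) ++ [(false, 1)]) (max (pvM l) c) 0
          (by simp [pvLast])
          (by rw [pvM_append, pvM_append]; simp)
          (by intro p hp
              rcases List.mem_append.mp hp with hp | hp
              · exact hpos p hp
              · simp at hp; subst hp; simp)
        simpa [pvM_append] using this
      -- k' = true, k = true : extend the incorrect run
      · have := ih (l ++ [(true, c + 1)]) (max (max (pvM l) c) (c + 1)) (c + 1)
          (by simp [pvLast])
          (by rw [pvM_append]; simp only [if_true]
              rw [max_assoc, max_eq_right (by omega : c ≤ c + 1)])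
          (by intro p hp
              rcases List.mem_append.mp hp with hp | hp
              · exact hl p hp
              · simp at hp; subst hp; simpa using by omega)
        simpa using this

lemma pv_maxD_eq_foldl (xs : List Int) (h : ∀ x ∈ xs, 0 ≤ x) :
    PySem.List.maxD xs (fun x => x) 0 = xs.foldl max 0 := by
  cases xs with
  | nil => simp [PySem.List.maxD, PySem.List.max?]
  | cons x t =>
    rw [PySem.List.maxD, PySem.List.max?_id_cons]
    simp [max_eq_right (h x (by simp))]

-- ===== VERDICT (by name: the statement is the Claim_ definition above) =====
theorem longest_incorrect_streak_py_spec : Claim_equal_longest_incorrect_streak_py := by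
  intro sequence _
  unfold Spec_longest_incorrect_streak_py longest_incorrect_streak_py longest_incorrect_streak_py_alt
  have hA : sequence.foldl
      (fun (st : Int × Int) interaction =>
        if !((List.lookup "is_correct" interaction).getD false) then
          (max st.1 (st.2 + 1), st.2 + 1)
        else
          (st.1, 0)) (0, 0)
      = (sequence.map pvKey).foldl
        (fun (st : Int × Int) k => if k then (max st.1 (st.2 + 1), st.2 + 1) else (st.1, 0))
        (0, 0) := by
    rw [List.foldl_map]
    rfl
  rw [hA, pv_main (sequence.map pvKey) [] 0 0 (by simp [pvLast]) (by simp [pvM]) (by simp)]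
  rw [pv_maxD_eq_foldl]
  · rfl
  · intro x hx
    simp only [List.mem_map, List.mem_filter] at hx
    obtain ⟨p, ⟨hp, _⟩, rfl⟩ := hx
    exact pv_runs_nonneg (sequence.map pvKey) [] (by simp) p hp
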